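-- pv_equiv track=rewrite | github.com/jjob-spec/ingestkit | packages/ingestkit-pdf/src/ingestkit_pdf/processors/complex_processor.py | _concatenate_pages
-- ===== SOURCE A (Python) =====
-- def _concatenate_pages(
--     page_texts: dict[int, str],
-- ) -> tuple[str, list[int], dict[int, int]]:
--     """Concatenate page texts and compute page boundary offsets.
--
--     Returns:
--         - full_text: The concatenated document text.
--         - page_boundary_list: Character offsets where each page starts.
--         - page_offset_map: Mapping of page_number -> char_offset.
--     """
--     sorted_pages = sorted(page_texts.keys())
--     parts: list[str] = []
--     page_boundary_list: list[int] = []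
--     page_offset_map: dict[int, int] = {}
--     offset = 0
--
--     for page_num in sorted_pages:
--         page_boundary_list.append(offset)
--         page_offset_map[page_num] = offset
--         text = page_texts[page_num]
--         parts.append(text)
--         offset += len(text) + 1  # +1 for joining newline
--
--     full_text = "\n".join(parts)
--     return full_text, page_boundary_list, page_offset_map
-- ===== SOURCE B (Python) =====
-- def _concatenate_pages(page_texts):
--     items = sorted(page_texts.items(), key=lambda kv: kv[0])
--     full_text, boundaries = _merge(items)
--     return full_text, boundaries, dict(zip([k for k, _ in items], boundaries))
--
--
-- def _merge(items):
--     """Divide and conquer: build (text, start offsets) for each half, then combine,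
--     shifting the right half's offsets by len(left text) + 1 (the joining newline)."""
--     if not items:
--         return "", []
--     if len(items) == 1:
--         return items[0][1], [0]
--     mid = len(items) // 2
--     lt, lb = _merge(items[:mid])
--     rt, rb = _merge(items[mid:])
--     shift = len(lt) + 1
--     return lt + "\n" + rt, lb + [shift + b for b in rb]
-- ===== Notes on version B (the rewrite author's own statement) =====
-- stated objective: alternative
-- what changed: A runs one left-to-right loop over the sorted keys with a running offset, appending to four accumulators and looking each key up in the dict, then joins the parts; B is a divide-and-conquer merge on the sorted item list: it recursively builds (text, start offsets) for each half and combines them by concatenating the texts and shifting every offset of the right half by len(left text)+1 -- no running offset, no per-key lookup, no join over a parts list.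
import Mathlib
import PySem

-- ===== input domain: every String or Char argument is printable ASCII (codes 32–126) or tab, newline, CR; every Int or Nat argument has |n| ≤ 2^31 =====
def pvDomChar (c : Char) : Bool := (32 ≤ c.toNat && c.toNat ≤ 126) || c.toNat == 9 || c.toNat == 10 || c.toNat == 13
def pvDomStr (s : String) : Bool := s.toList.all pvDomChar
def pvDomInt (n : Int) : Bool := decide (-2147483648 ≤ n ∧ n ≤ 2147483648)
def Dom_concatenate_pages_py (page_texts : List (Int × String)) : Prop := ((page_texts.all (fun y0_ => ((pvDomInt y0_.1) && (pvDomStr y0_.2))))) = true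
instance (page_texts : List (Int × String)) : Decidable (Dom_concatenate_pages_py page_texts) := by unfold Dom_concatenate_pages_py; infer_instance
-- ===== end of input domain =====

-- B replaces A's single forward loop (running offset, four accumulators, per-key dict lookup)
-- by a divide-and-conquer merge on the sorted items: build (text, offsets) for each half,
-- concatenate the texts and shift the right half's offsets by len(left text)+1 (alternative algorithm).

-- ===== PORT A =====
def concatenate_pages_py (page_texts : List (Int × String)) : String × List Int × (List (Int × Int)) :=
  let d := PySem.Dict.mk page_texts
  let sorted_pages := PySem.List.sorted d.keys (fun k => k)
  let st := sorted_pages.foldl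
    (fun (s : List String × List Int × PySem.Dict Int Int × Int) page_num =>
      -- text = page_texts[page_num]; page_num is always a key, so the "" default is unreachable
      let text := d.getD page_num ""
      (s.1 ++ [text], s.2.1 ++ [s.2.2.2], s.2.2.1.insert page_num s.2.2.2,
        s.2.2.2 + PySem.Str.len text + 1))
    ([], [], PySem.Dict.empty, 0)
  (PySem.Str.join "\n" st.1, st.2.1, st.2.2.1.items)

-- ===== PORT B =====
-- Source B's _merge: divide and conquer on the item list; text '+' on str is ported by hand as
-- String '++' (exact: Python str concatenation is code-point concatenation); len(items)//2 on a
-- nonnegative length is Nat division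
def pvMerge (items : List (Int × String)) : String × List Int :=
  match items with
  | [] => ("", [])
  | [p] => (p.2, [0])
  | p :: q :: rest =>
    let mid := (p :: q :: rest).length / 2
    let l := pvMerge ((p :: q :: rest).take mid)
    let r := pvMerge ((p :: q :: rest).drop mid)
    (l.1 ++ "\n" ++ r.1, l.2 ++ r.2.map (fun b => (PySem.Str.len l.1 + 1) + b))
termination_by items.length
decreasing_by
  · simp [List.length_take]; omega
  · simp [List.length_drop]; omega

def concatenate_pages_py_alt (page_texts : List (Int × String)) : String × List Int × (List (Int × Int)) :=
  let items := PySem.List.sorted page_texts (fun p => p.1)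
  let t := pvMerge items
  (t.1, t.2, (PySem.Dict.ofList ((items.map (fun p => p.1)).zip t.2)).items)

-- ===== PRECONDITION & SPEC =====
-- Pre_ excludes association lists with duplicate keys: A's parameter is a Python dict, which
-- cannot hold duplicate keys, so such lists represent no input A is ever called on.
def Pre_concatenate_pages_py (page_texts : List (Int × String)) : Prop :=
  (page_texts.map Prod.fst).Nodup
instance (page_texts : List (Int × String)) : Decidable (Pre_concatenate_pages_py page_texts) := by
  unfold Pre_concatenate_pages_py; infer_instance

def pvWitness_concatenate_pages_py : (List (Int × String)) := [(3, "xy"), (1, "a")]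

def Spec_concatenate_pages_py (page_texts : List (Int × String)) (out : String × List Int × (List (Int × Int))) : Prop := out = concatenate_pages_py_alt page_texts
instance (page_texts : List (Int × String)) (out : String × List Int × (List (Int × Int))) : Decidable (Spec_concatenate_pages_py page_texts out) := by unfold Spec_concatenate_pages_py; infer_instance

-- ===== CLAIM (what is proved, stated in full; the proofs are below) =====
def Claim_equal_concatenate_pages_py : Prop := ∀ (page_texts : List (Int × String)), Dom_concatenate_pages_py page_texts → Pre_concatenate_pages_py page_texts → Spec_concatenate_pages_py page_texts (concatenate_pages_py page_texts)

-- ===== LEMMAS AND PROOFS =====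

-- the start-offset list, as A computes it: running offset threaded left to right
def pvOffs (off : Int) : List (Int × String) → List Int
  | [] => []
  | p :: I => off :: pvOffs (off + PySem.Str.len p.2 + 1) I

lemma pvOffs_shift (I : List (Int × String)) :
    ∀ c off : Int, pvOffs (c + off) I = (pvOffs off I).map (fun b => c + b) := by
  induction I with
  | nil => intro c off; simp [pvOffs]
  | cons p I ih =>
    intro c off
    simp only [pvOffs, List.map_cons]
    rw [add_assoc, add_assoc, ih]
    simp [add_assoc]

-- A's loop, after the per-key lookup has been replaced by the item's own text
lemma pv_loopA (I : List (Int × String)) :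
    ∀ (parts : List String) (bl : List Int) (om : PySem.Dict Int Int) (off : Int),
      I.foldl
        (fun (s : List String × List Int × PySem.Dict Int Int × Int) p =>
          (s.1 ++ [p.2], s.2.1 ++ [s.2.2.2], s.2.2.1.insert p.1 s.2.2.2,
            s.2.2.2 + PySem.Str.len p.2 + 1)) (parts, bl, om, off)
      = (parts ++ I.map (fun p => p.2), bl ++ pvOffs off I,
          om.update ((I.map (fun p => p.1)).zip (pvOffs off I)),
          off + (I.map (fun p => PySem.Str.len p.2 + 1)).sum) := by
  induction I with
  | nil => intro parts bl om off; simp [pvOffs, PySem.Dict.update]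
  | cons p I ih =>
    intro parts bl om off
    simp only [List.foldl_cons]
    rw [ih]
    simp only [pvOffs, List.map_cons, List.zip_cons_cons, List.sum_cons, PySem.Dict.update,
      List.foldl_cons, List.append_assoc, List.singleton_append, add_assoc]

-- lengths of the per-page (len+1) contributions, the shift applied to a right half
def pvSumLen (I : List (Int × String)) : Int := (I.map (fun p => PySem.Str.len p.2 + 1)).sum

lemma pvOffs_append (L : List (Int × String)) :
    ∀ (R : List (Int × String)) (off : Int),
      pvOffs off (L ++ R) = pvOffs off L ++ pvOffs (off + pvSumLen L) R := by
  induction L with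
  | nil => intro R off; simp [pvOffs, pvSumLen]
  | cons p L ih =>
    intro R off
    simp only [List.cons_append, pvOffs, ih, pvSumLen, List.map_cons, List.sum_cons,
      List.cons.injEq, true_and]
    congr 2
    ring

lemma pv_join_cons (sep : List Char) (x : List Char) (R : List (List Char)) (hR : R ≠ []) :
    PySem.Chars.join sep (x :: R) = x ++ sep ++ PySem.Chars.join sep R := by
  cases R with
  | nil => exact absurd rfl hR
  | cons y R => exact PySem.Chars.join_cons_cons ..

lemma pv_join_append (sep : List Char) (L R : List (List Char)) (hL : L ≠ []) (hR : R ≠ []) :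
    PySem.Chars.join sep (L ++ R) = PySem.Chars.join sep L ++ sep ++ PySem.Chars.join sep R := by
  induction L with
  | nil => exact absurd rfl hL
  | cons x L ih =>
    cases L with
    | nil =>
      simp only [List.singleton_append]
      rw [pv_join_cons sep x R hR, PySem.Chars.join_singleton]
    | cons y L =>
      have h1 : (y :: L) ++ R ≠ [] := by simp
      rw [List.cons_append, pv_join_cons sep x _ (by simp), ih (by simp),
        PySem.Chars.join_cons_cons]
      simp [List.append_assoc]

lemma pv_join_len (L : List (List Char)) (hL : L ≠ []) :
    (PySem.Chars.join ['\n'] L).length + 1 = (L.map (fun t => t.length + 1)).sum := by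
  induction L with
  | nil => exact absurd rfl hL
  | cons x L ih =>
    cases L with
    | nil => simp [PySem.Chars.join_singleton]
    | cons y L =>
      rw [PySem.Chars.join_cons_cons]
      simp only [List.map_cons, List.sum_cons] at ih ⊢
      have := ih (by simp)
      simp only [List.length_append, List.length_cons, List.length_nil] at *
      omega

-- B's divide and conquer computes the joined text and exactly A's offsets
lemma pv_build (I : List (Int × String)) :
    pvMerge I = (PySem.Str.join "\n" (I.map (fun p => p.2)), pvOffs 0 I) := by
  induction I using pvMerge.induct with
  | case1 => simp [pvMerge, pvOffs, PySem.Str.join]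
  | case2 p =>
    simp only [pvMerge, List.map_cons, List.map_nil, pvOffs, Prod.mk.injEq]
    refine ⟨?_, trivial⟩
    apply String.toList_injective
    simp [PySem.Str.toList_join, PySem.Chars.join, List.intercalate]
  | case3 p q rest mid ihl ihr =>
    have hlen : (p :: q :: rest).length = rest.length + 2 := by simp
    have hmid1 : 1 ≤ mid := by simp only [mid, hlen]; omega
    set I := p :: q :: rest with hIdef
    have hmidlt : mid < I.length := by simp only [mid, hIdef]; simp; omega
    have hsplit : I.take mid ++ I.drop mid = I := List.take_append_drop ..
    have hLne : I.take mid ≠ [] := by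
      have h1 : (I.take mid).length = mid := by rw [List.length_take]; omega
      intro h; rw [h] at h1; simp at h1; omega
    have hRne : I.drop mid ≠ [] := by
      have h1 : (I.drop mid).length = I.length - mid := List.length_drop ..
      intro h; rw [h] at h1; simp at h1; omega
    have hnl : "\n".toList = ['\n'] := rfl
    rw [pvMerge]
    simp only [← hIdef]
    have hmid : I.length / 2 = mid := rfl
    simp only [hmid, ihl, ihr, Prod.mk.injEq]
    constructor
    · -- text component
      apply String.toList_injective
      have hja := pv_join_append ['\n'] ((I.take mid).map (fun p => p.2) |>.map String.toList)
        ((I.drop mid).map (fun p => p.2) |>.map String.toList)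
        (by simpa using hLne) (by simpa using hRne)
      have hs : List.map String.toList (List.map (fun p => p.2) I)
          = List.map String.toList (List.map (fun p => p.2) (I.take mid))
            ++ List.map String.toList (List.map (fun p => p.2) (I.drop mid)) := by
        rw [← List.map_append, ← List.map_append, hsplit]
      simp only [PySem.Str.toList_join, String.toList_append, hnl]
      rw [hs, hja]
    · -- offsets component
      symm
      have hshift : pvSumLen (I.take mid)
          = PySem.Str.len (PySem.Str.join "\n" ((I.take mid).map (fun p => p.2))) + 1 := by
        have h := pv_join_len ((I.take mid).map (fun p => p.2) |>.map String.toList)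
          (by simpa using hLne)
        simp only [pvSumLen, PySem.Str.len, PySem.Str.toList_join, hnl]
        calc (List.map (fun p => (↑p.2.toList.length : Int) + 1) (I.take mid)).sum
            = (((I.take mid).map (fun p => p.2.toList.length + 1)).map (Nat.cast : ℕ → ℤ)).sum := by
              simp [List.map_map, Function.comp_def]
          _ = ((((I.take mid).map (fun p => p.2.toList.length + 1)).sum : ℕ) : ℤ) := by
              rw [Nat.cast_list_sum]
          _ = _ := by
              rw [show ((I.take mid).map (fun p => p.2.toList.length + 1)).sum
                    = (PySem.Chars.join ['\n']
                        (List.map String.toList (List.map (fun p => p.2) (I.take mid)))).length + 1 from by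
                    rw [h]; simp [List.map_map, Function.comp_def]]
              omega
      calc pvOffs 0 I = pvOffs 0 (I.take mid ++ I.drop mid) := by rw [hsplit]
        _ = pvOffs 0 (I.take mid) ++ pvOffs (0 + pvSumLen (I.take mid)) (I.drop mid) :=
            pvOffs_append ..
        _ = pvOffs 0 (I.take mid)
              ++ (pvOffs 0 (I.drop mid)).map
                  (fun b => (PySem.Str.len (PySem.Str.join "\n" ((I.take mid).map (fun p => p.2))) + 1) + b) := by
            rw [show (0 : Int) + pvSumLen (I.take mid) = pvSumLen (I.take mid) + 0 from by ring,
              pvOffs_shift, hshift]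

theorem pv_main (pts : List (Int × String)) (hnd : (pts.map Prod.fst).Nodup) :
    concatenate_pages_py pts = concatenate_pages_py_alt pts := by
  classical
  set I := PySem.List.sorted pts (fun p => p.1) with hI
  have hperm : I.Perm pts := PySem.List.sorted_perm pts _ false
  have hndI : (I.map Prod.fst).Nodup := ((hperm.map Prod.fst).nodup_iff).mpr hnd
  have hle : List.Pairwise (fun a b => a ≤ b) (I.map (fun p => p.1)) :=
    PySem.List.sorted_map_key_pairwise pts (fun p => p.1)
  have hlt : List.Pairwise (fun a b : Int × String => a.1 < b.1) I := by
    have hne : List.Pairwise (fun a b : Int × String => a.1 ≠ b.1) I := by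
      have := (List.pairwise_map (l := I) (R := (· ≠ ·)) (f := Prod.fst)).mp hndI
      exact this
    have hle' : List.Pairwise (fun a b : Int × String => a.1 ≤ b.1) I :=
      (List.pairwise_map (l := I)).mp hle
    exact (hle'.and hne).imp (fun h => lt_of_le_of_ne h.1 h.2)
  -- A's sorted key list is the key list of the sorted items
  have hkeys : PySem.List.sorted (pts.map (fun p => p.1)) (fun k => k) = I.map (fun p => p.1) := by
    refine PySem.List.sorted_eq_of_perm_of_pairwise_lt _ _ _ (hperm.map _) ?_
    exact (List.pairwise_map (l := I)).mpr hlt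
  -- the lookup inside A's loop returns the item's own text
  have hlook : ∀ p ∈ I, (PySem.Dict.mk pts).getD p.1 "" = p.2 := by
    intro p hp
    have hmem : (p.1, p.2) ∈ (PySem.Dict.mk pts).items := by
      show (p.1, p.2) ∈ pts
      simpa using hperm.mem_iff.mp hp
    exact PySem.Dict.getD_of_mem_items _ hmem (by simpa [PySem.Dict.keys] using hnd) ""
  show concatenate_pages_py pts = _
  unfold concatenate_pages_py concatenate_pages_py_alt
  simp only [PySem.Dict.keys]
  rw [← hI, hkeys, List.foldl_map]
  rw [PySem.List.foldl_congr_mem' _ _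
        (fun (s : List String × List Int × PySem.Dict Int Int × Int) p =>
          (s.1 ++ [p.2], s.2.1 ++ [s.2.2.2], s.2.2.1.insert p.1 s.2.2.2,
            s.2.2.2 + PySem.Str.len p.2 + 1)) _
        (fun p hp acc => by simp only [hlook p hp])]
  rw [pv_loopA, pv_build]
  simp only [List.nil_append, PySem.Dict.ofList]

-- ===== VERDICT (by name: the statement is the Claim_ definition above) =====
theorem concatenate_pages_py_spec : Claim_equal_concatenate_pages_py := by
  intro pts _ hpre
  unfold Spec_concatenate_pages_py
  exact pv_main pts hpre
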